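-- pv_equiv track=rewrite | github.com/mak989063/python-core-concepts | DSA/make_all_elem_same_1D.py | solve
-- ===== SOURCE A (Python) =====
-- def solve(A):
--     Max = max(A)
--     count = 0
--     for i in range(len(A)):
--         if A[i] != Max:
--             diff = Max - A[i]
--             count += diff
--
--     return count
-- ===== SOURCE B (Python) =====
-- def solve(A):
--     return len(A) * max(A) - sum(A)
-- ===== Notes on version B (the rewrite author's own statement) =====
-- stated objective: simpler
-- what changed: Replaces the index loop with the conditional accumulator by the closed form len(A)*max(A) - sum(A).
import Mathlib
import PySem

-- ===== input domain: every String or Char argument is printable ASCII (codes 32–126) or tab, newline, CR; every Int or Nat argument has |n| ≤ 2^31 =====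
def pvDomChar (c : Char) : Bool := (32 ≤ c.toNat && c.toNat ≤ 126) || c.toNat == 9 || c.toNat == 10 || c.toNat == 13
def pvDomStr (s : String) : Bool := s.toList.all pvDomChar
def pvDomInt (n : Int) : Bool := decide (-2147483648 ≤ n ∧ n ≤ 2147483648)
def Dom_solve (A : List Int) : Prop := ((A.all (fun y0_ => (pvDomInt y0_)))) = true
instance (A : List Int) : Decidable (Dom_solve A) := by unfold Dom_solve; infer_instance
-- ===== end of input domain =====

-- B replaces the conditional accumulation loop by the closed form len(A)*max(A) - sum(A) (simpler).

-- ===== PORT A =====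
-- max(A) raises ValueError on an empty list; Pre_solve excludes it.
def solve (A : List Int) : Int :=
  match PySem.List.max? A (fun x => x) with
  | none => 0   -- unreachable under Pre_solve
  | some Max =>
    (PySem.List.pyRange 0 A.length 1).foldl
      (fun count i =>
        let a := PySem.List.pyGetD A i 0
        if a ≠ Max then count + (Max - a) else count) 0

-- ===== PORT B =====
def solve_alt (A : List Int) : Int :=
  match PySem.List.max? A (fun x => x) with
  | none => 0   -- unreachable under Pre_solve
  | some Max => (A.length : Int) * Max - A.sum

-- ===== PRECONDITION & SPEC =====
-- max(A) (and hence both programs) raises ValueError on the empty list.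
def Pre_solve (A : List Int) : Prop := A ≠ []
instance (A : List Int) : Decidable (Pre_solve A) := by unfold Pre_solve; infer_instance
def pvWitness_solve : List Int := [1, 3, 2]

def Spec_solve (A : List Int) (out : Int) : Prop := out = solve_alt A
instance (A : List Int) (out : Int) : Decidable (Spec_solve A out) := by unfold Spec_solve; infer_instance

-- ===== CLAIM (what is proved, stated in full; the proofs are below) =====
def Claim_equal_solve : Prop := ∀ (A : List Int), Dom_solve A → Pre_solve A → Spec_solve A (solve A)

-- ===== LEMMAS AND PROOFS =====

-- the loop body adds Max - a whether or not the guard fires (it adds 0 when a = Max)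
lemma loop_body_eq (Max count a : Int) :
    (if a ≠ Max then count + (Max - a) else count) = count + (Max - a) := by
  split_ifs with h
  · rfl
  · simp only [not_not] at h; omega

lemma foldl_sub_sum (Max : Int) (xs : List Int) (init : Int) :
    xs.foldl (fun count a => count + (Max - a)) init
      = init + (xs.length : Int) * Max - xs.sum := by
  induction xs generalizing init with
  | nil => simp
  | cons x t ih => simp [List.foldl_cons, ih]; ring

-- ===== VERDICT (by name: the statement is the Claim_ definition above) =====
theorem solve_spec : Claim_equal_solve := by
  intro A _ _
  unfold Spec_solve solve solve_alt
  cases h : PySem.List.max? A (fun x => x) with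
  | none => rfl
  | some Max =>
    have := PySem.List.foldl_pyRange_zero_pyGetD' A 0
      (fun count a => if a ≠ Max then count + (Max - a) else count) 0
    simp only [loop_body_eq] at this ⊢
    rw [this, foldl_sub_sum]
    ring
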